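-- pv_equiv track=rewrite | github.com/omniwaifu/dere | src/dere_graph/dere_graph/evals.py | _match_expected
-- ===== SOURCE A (Python) =====
-- from typing import Iterable
--
-- def _normalize(text: str) -> str:
--     return " ".join(text.lower().split())
--
-- def _match_expected(expected: Iterable[str], candidates: Iterable[str]) -> list[str]:
--     normalized_candidates = [_normalize(candidate) for candidate in candidates if candidate]
--     hits = []
--     for item in expected:
--         normalized_item = _normalize(item)
--         if any(normalized_item in candidate for candidate in normalized_candidates):
--             hits.append(item)
--     return hits
-- ===== SOURCE B (Python) =====
-- def _normalize(text: str) -> str: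
--     return " ".join(text.lower().split())
--
--
-- def _match_expected(expected, candidates):
--     normalized = [_normalize(candidate) for candidate in candidates if candidate]
--     if not normalized:
--         return []
--     # Normalized strings never contain "\n", so joining with it cannot create
--     # a match spanning two candidates: one substring test replaces the inner scan.
--     haystack = "\n".join(normalized)
--     return [item for item in expected if _normalize(item) in haystack]
-- ===== Notes on version B (the rewrite author's own statement) =====
-- stated objective: faster
-- what changed: Instead of scanning every normalized candidate per expected item, B joins the normalized candidates once with '\n' (a character normalization can never produce) and runs a single substring test per expected item against that haystack.
import Mathlib
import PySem

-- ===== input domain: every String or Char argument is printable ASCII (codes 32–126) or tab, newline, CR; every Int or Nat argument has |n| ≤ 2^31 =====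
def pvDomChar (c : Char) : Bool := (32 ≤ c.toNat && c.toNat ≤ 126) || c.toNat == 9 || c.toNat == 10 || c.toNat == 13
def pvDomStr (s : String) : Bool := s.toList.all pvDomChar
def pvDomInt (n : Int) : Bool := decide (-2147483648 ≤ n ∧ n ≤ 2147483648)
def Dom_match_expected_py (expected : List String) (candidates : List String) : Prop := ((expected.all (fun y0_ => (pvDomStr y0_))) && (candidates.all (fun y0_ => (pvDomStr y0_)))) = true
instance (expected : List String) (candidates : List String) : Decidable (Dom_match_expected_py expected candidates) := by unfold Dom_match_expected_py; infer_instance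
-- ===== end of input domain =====

-- B replaces the inner scan over candidates by ONE substring test against the
-- candidates joined with "\n" (a character no normalized string contains).

-- ===== PORT A =====
-- shared helper: _normalize(text) = " ".join(text.lower().split())
def normalizePy (s : String) : String :=
  PySem.Str.join " " (PySem.Str.split₀ (PySem.Str.lower s))

def match_expected_py (expected : List String) (candidates : List String) : List String :=
  let normalizedCandidates := (candidates.filter (fun c => !(c == ""))).map normalizePy
  expected.foldl (fun hits item =>
    let normalizedItem := normalizePy item
    if normalizedCandidates.any (fun candidate => PySem.Str.isIn normalizedItem candidate)
    then hits ++ [item] else hits) []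

-- ===== PORT B =====
def match_expected_py_alt (expected : List String) (candidates : List String) : List String :=
  let normalized := (candidates.filter (fun c => !(c == ""))).map normalizePy
  if normalized.isEmpty then []
  else
    let haystack := PySem.Str.join "\n" normalized
    expected.filter (fun item => PySem.Str.isIn (normalizePy item) haystack)

-- ===== PRECONDITION & SPEC =====
def Spec_match_expected_py (expected : List String) (candidates : List String) (out : List String) : Prop := out = match_expected_py_alt expected candidates
instance (expected : List String) (candidates : List String) (out : List String) : Decidable (Spec_match_expected_py expected candidates out) := by unfold Spec_match_expected_py; infer_instance

-- ===== CLAIM (what is proved, stated in full; the proofs are below) =====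
def Claim_equal_match_expected_py : Prop := ∀ (expected : List String) (candidates : List String), Dom_match_expected_py expected candidates → Spec_match_expected_py expected candidates (match_expected_py expected candidates)

-- ===== LEMMAS AND PROOFS =====

-- every word produced by split₀ is whitespace-free
theorem split0_go_no_space (s cur : List Char) (acc : List (List Char))
    (hcur : ∀ c ∈ cur, PySem.Chars.isspace c = false)
    (hacc : ∀ w ∈ acc, ∀ c ∈ w, PySem.Chars.isspace c = false) :
    ∀ w ∈ PySem.Chars.split₀.go s cur acc, ∀ c ∈ w, PySem.Chars.isspace c = false := by
  induction s generalizing cur acc with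
  | nil =>
    intro w hw
    simp only [PySem.Chars.split₀.go] at hw
    split at hw
    · simp only [List.mem_reverse] at hw; exact hacc w hw
    · simp only [List.mem_reverse, List.mem_cons] at hw
      rcases hw with h | h
      · subst h; intro c hc; exact hcur c (List.mem_reverse.mp hc)
      · exact hacc w h
  | cons c rest ih =>
    intro w hw
    simp only [PySem.Chars.split₀.go] at hw
    split at hw
    · split at hw
      · exact ih [] acc (by simp) hacc w hw
      · refine ih [] (cur.reverse :: acc) (by simp) ?_ w hw
        intro w' hw'
        rcases List.mem_cons.mp hw' with h | h
        · subst h; intro d hd; exact hcur d (List.mem_reverse.mp hd)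
        · exact hacc w' h
    · next hns =>
      refine ih (c :: cur) acc ?_ hacc w hw
      intro d hd
      rcases List.mem_cons.mp hd with h | h
      · subst h; exact Bool.of_not_eq_true hns
      · exact hcur d h

theorem split0_no_space (s : List Char) :
    ∀ w ∈ PySem.Chars.split₀ s, ∀ c ∈ w, PySem.Chars.isspace c = false := by
  simpa [PySem.Chars.split₀] using split0_go_no_space s [] [] (by simp) (by simp)

-- membership in a single-char-separated join
theorem mem_join_sep {x sep : Char} {ws : List (List Char)}
    (h : x ∈ PySem.Chars.join [sep] ws) : x = sep ∨ ∃ w ∈ ws, x ∈ w := by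
  induction ws with
  | nil => simp [PySem.Chars.join_nil] at h
  | cons w t ih =>
    cases t with
    | nil => right; exact ⟨w, by simp, by simpa [PySem.Chars.join_singleton] using h⟩
    | cons w' t' =>
      rw [PySem.Chars.join_cons_cons] at h
      rcases List.mem_append.mp h with h1 | h2
      · rcases List.mem_append.mp h1 with h3 | h4
        · right; exact ⟨w, by simp, h3⟩
        · left; simpa using h4
      · rcases ih h2 with h | ⟨v, hv, hx⟩
        · exact Or.inl h
        · exact Or.inr ⟨v, List.mem_cons_of_mem _ hv, hx⟩

-- normalized strings never contain '\n'
theorem normalize_no_newline (s : String) : '\n' ∉ (normalizePy s).toList := by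
  intro h
  simp only [normalizePy, PySem.Str.toList_join, PySem.Str.split₀_map_toList,
    PySem.Str.toList_lower] at h
  have hsep : (" " : String).toList = [' '] := rfl
  rw [hsep] at h
  rcases mem_join_sep h with h | ⟨w, hw, hc⟩
  · exact absurd h (by decide)
  · have := split0_no_space _ w hw '\n' hc
    simp [show PySem.Chars.isspace '\n' = true from rfl] at this

-- splitting an infix across a separator the pattern does not contain
theorem infix_append_sep {p a b : List Char} {sep : Char} (hsep : sep ∉ p) :
    p <:+: a ++ sep :: b ↔ p <:+: a ∨ p <:+: b := by
  constructor
  · rintro ⟨u, v, huv⟩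
    rcases Nat.lt_or_ge a.length (u.length + p.length) with hlt | hge
    · rcases Nat.lt_or_ge a.length u.length with hlt2 | hge2
      · -- p lies inside b
        right
        have hstep := congrArg (List.drop (a.length + 1)) huv
        rw [List.append_assoc] at hstep
        rw [List.drop_append] at hstep
        rw [show a.length + 1 - u.length = 0 from by omega, List.drop_zero] at hstep
        rw [List.drop_append] at hstep
        rw [show a.length + 1 - a.length = 1 from by omega,
          List.drop_eq_nil_of_le (show a.length ≤ a.length + 1 from by omega)] at hstep
        simp only [List.drop_succ_cons, List.drop_zero, List.nil_append] at hstep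
        exact ⟨u.drop (a.length + 1), v, by rw [List.append_assoc]; exact hstep⟩
      · -- the separator position falls inside p: contradiction
        exfalso
        have hlen : a.length < (u ++ p ++ v).length := by
          rw [huv]; simp
        have hsepEq : (u ++ p ++ v)[a.length]'hlen = sep := by
          rw [List.getElem_of_eq huv]
          rw [List.getElem_append_right (by simp)]
          simp
        have hk : a.length - u.length < p.length := by omega
        have hidx : (u ++ p ++ v)[a.length]'hlen = p[a.length - u.length]'hk := by
          rw [List.getElem_append_left (bs := v) (by simp; omega)]
          rw [List.getElem_append_right (by omega)]
        exact hsep (hsepEq ▸ hidx ▸ List.getElem_mem hk)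
    · -- p lies inside a
      left
      have hstep := congrArg (List.take a.length) huv
      rw [List.append_assoc] at hstep
      rw [List.take_append] at hstep
      rw [List.take_of_length_le (show u.length ≤ a.length from by omega)] at hstep
      rw [List.take_append] at hstep
      rw [List.take_of_length_le (show p.length ≤ a.length - u.length from by omega)] at hstep
      rw [List.take_append] at hstep
      rw [List.take_of_length_le (le_refl a.length),
        show a.length - a.length = 0 from by omega, List.take_zero,
        List.append_nil] at hstep
      exact ⟨u, v.take (a.length - u.length - p.length), by rw [List.append_assoc]; exact hstep⟩
  · rintro (h | h)
    · exact h.trans ⟨[], sep :: b, by simp⟩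
    · exact h.trans ⟨a ++ [sep], [], by simp⟩

-- pattern without the separator is in the join iff it is in some part
theorem infix_join_sep {p : List Char} {sep : Char} {ws : List (List Char)}
    (hsep : sep ∉ p) (hne : ws ≠ []) :
    p <:+: PySem.Chars.join [sep] ws ↔ ∃ w ∈ ws, p <:+: w := by
  induction ws with
  | nil => exact absurd rfl hne
  | cons w t ih =>
    cases t with
    | nil => simp [PySem.Chars.join_singleton]
    | cons w' t' =>
      rw [PySem.Chars.join_cons_cons, List.append_assoc, List.singleton_append,
        infix_append_sep hsep, ih (by simp)]
      constructor
      · rintro (h | ⟨v, hv, hp⟩)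
        · exact ⟨w, by simp, h⟩
        · exact ⟨v, List.mem_cons_of_mem _ hv, hp⟩
      · rintro ⟨v, hv, hp⟩
        rcases List.mem_cons.mp hv with h | h
        · exact Or.inl (h ▸ hp)
        · exact Or.inr ⟨v, h, hp⟩

-- the per-item tests of A and B agree
theorem any_eq_isIn_join (item : String) (N : List String) (hne : N ≠ []) :
    N.any (fun candidate => PySem.Str.isIn (normalizePy item) candidate) =
      PySem.Str.isIn (normalizePy item) (PySem.Str.join "\n" N) := by
  rw [Bool.eq_iff_iff, List.any_eq_true]
  have hsep : ("\n" : String).toList = ['\n'] := rfl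
  rw [PySem.Str.isIn_iff_infix, PySem.Str.toList_join, hsep,
    infix_join_sep (normalize_no_newline item) (by simpa using hne)]
  constructor
  · rintro ⟨c, hc, h⟩
    exact ⟨c.toList, List.mem_map_of_mem hc, (PySem.Str.isIn_iff_infix _ _).mp h⟩
  · rintro ⟨w, hw, h⟩
    rcases List.mem_map.mp hw with ⟨c, hc, rfl⟩
    exact ⟨c, hc, (PySem.Str.isIn_iff_infix _ _).mpr h⟩

-- ===== VERDICT (by name: the statement is the Claim_ definition above) =====
theorem match_expected_py_spec : Claim_equal_match_expected_py := by
  intro expected candidates _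
  unfold Spec_match_expected_py match_expected_py match_expected_py_alt
  set N := (candidates.filter (fun c => !(c == ""))).map normalizePy with hN
  have hfold := PySem.List.foldl_append_if
    (fun item => N.any (fun candidate => PySem.Str.isIn (normalizePy item) candidate))
    (fun item => item) expected []
  simp only [List.nil_append, List.map_id_fun'] at hfold
  by_cases hne : N = []
  · simp [hne]
  · rw [if_neg (by simpa [List.isEmpty_iff] using hne)]
    rw [hfold]
    simp only [id_eq]
    exact List.filter_congr (fun item _ => any_eq_isIn_join item N hne)
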